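-- pv_equiv track=rewrite | github.com/RevisorTeam/revisor | utils.py | replace_dict_frame_ids
-- ===== SOURCE A (Python) =====
-- def replace_dict_frame_ids(
-- 		input_dict, min_frame_id, max_frame_id, voting_start, voting_end
-- ):
-- 	"""
-- 	Make output sample dictionary of an input dict and
-- 	update frame_ids from source to output ones.
--
-- 	For example:
-- 	Inputs:
-- 		input_dict.keys() = [349, 350, 351, ... 490]
-- 		min_frame_id = 360
-- 		max_frame_id = 450
-- 		voting_start = 380
-- 		voting_end = 430
--
-- 	Outputs:
-- 		new_frames.keys() = [0, 1, 2, ... 90]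
-- 		new_voting_start = 20
-- 		new_voting_end = 70
--
-- 	Args:
-- 		input_dict: dict with bboxes / poses / confs / orientations data of a person.
-- 			Dictionary has source frame ids in keys
-- 		min_frame_id: starting source frame id of an output video
-- 		max_frame_id: ending source frame id of an output video
-- 		voting_start: source frame id of starting voting action
-- 		voting_end: source frame id of ending voting action
--
-- 	Return:
-- 		new_frames: input dict with updated frame ids and target frames values
-- 		new_voting_start: updated frame_id of voting action starting
-- 		new_voting_end: updated frame_id of voting action ending
-- 	"""
--
-- 	saving_frame_ids = list(range(min_frame_id, max_frame_id + 1))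
-- 	old_frames_list = list(input_dict.keys())
--
-- 	new_frames = {}
-- 	new_voting_start = 0
-- 	new_voting_end = 0
-- 	for new_frame_id, old_frame_id in enumerate(saving_frame_ids):
--
-- 		new_frames[str(new_frame_id)] = input_dict[old_frame_id] \
-- 			if old_frame_id in old_frames_list else {}
--
-- 		if old_frame_id == voting_start:
-- 			new_voting_start = new_frame_id
-- 		if old_frame_id == voting_end:
-- 			new_voting_end = new_frame_id
--
-- 	return new_frames, new_voting_start, new_voting_end
-- ===== SOURCE B (Python) =====
-- def replace_dict_frame_ids(
-- 		input_dict, min_frame_id, max_frame_id, voting_start, voting_end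
-- ):
-- 	# Pre-fill every output slot with an empty dict, then scatter the input
-- 	# items into their slots; voting offsets are computed in closed form.
-- 	new_frames = {str(i): {} for i in range(max_frame_id - min_frame_id + 1)}
-- 	for old_frame_id, value in input_dict.items():
-- 		if min_frame_id <= old_frame_id <= max_frame_id:
-- 			new_frames[str(old_frame_id - min_frame_id)] = value
-- 	new_voting_start = (voting_start - min_frame_id
-- 		if min_frame_id <= voting_start <= max_frame_id else 0)
-- 	new_voting_end = (voting_end - min_frame_id
-- 		if min_frame_id <= voting_end <= max_frame_id else 0)
-- 	return new_frames, new_voting_start, new_voting_end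
-- ===== Notes on version B (the rewrite author's own statement) =====
-- stated objective: alternative
-- what changed: B pre-fills all output slots with empty dicts and scatters the input items into their slots in one pass over input_dict, computing both voting offsets by closed form, instead of A's gather loop over the whole frame range that rescans the key list and tracks the offsets inside the loop; the trade is a pass over input_dict plus the range instead of a range-driven gather.
import Mathlib
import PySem

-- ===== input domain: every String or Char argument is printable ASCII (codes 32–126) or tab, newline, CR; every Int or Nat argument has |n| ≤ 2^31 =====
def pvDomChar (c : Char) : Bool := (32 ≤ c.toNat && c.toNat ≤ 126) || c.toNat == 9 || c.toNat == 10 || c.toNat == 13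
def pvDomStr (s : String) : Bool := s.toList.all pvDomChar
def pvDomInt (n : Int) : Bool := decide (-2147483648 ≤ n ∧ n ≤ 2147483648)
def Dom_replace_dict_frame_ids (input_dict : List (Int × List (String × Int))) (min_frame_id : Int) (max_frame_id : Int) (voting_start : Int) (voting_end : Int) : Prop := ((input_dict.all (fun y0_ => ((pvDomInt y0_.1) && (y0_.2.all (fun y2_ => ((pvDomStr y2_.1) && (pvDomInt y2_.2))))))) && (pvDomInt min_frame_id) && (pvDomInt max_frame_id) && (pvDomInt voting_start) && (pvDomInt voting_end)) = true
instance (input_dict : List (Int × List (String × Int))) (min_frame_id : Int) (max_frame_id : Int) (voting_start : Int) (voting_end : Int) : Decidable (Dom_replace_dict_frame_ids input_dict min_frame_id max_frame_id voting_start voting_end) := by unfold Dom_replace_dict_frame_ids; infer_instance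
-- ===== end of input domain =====

-- B pre-fills the output slots with empty dicts and scatters the input items into
-- them in one pass (closed-form voting offsets) instead of A's gather loop over the
-- frame range that rescans the key list and tracks the offsets inside the loop.

-- ===== PORT A =====
-- A's `input_dict[old_frame_id]` is guarded by membership in the keys list, so the
-- guarded lookup is ported exactly as `getD _ []` inside the true branch (the lookup
-- cannot raise there).
def replace_dict_frame_ids (input_dict : List (Int × List (String × Int))) (min_frame_id : Int) (max_frame_id : Int) (voting_start : Int) (voting_end : Int) : (List (String × List (String × Int))) × Int × Int :=
  let d : PySem.Dict Int (List (String × Int)) := PySem.Dict.mk input_dict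
  let saving_frame_ids := PySem.List.pyRange min_frame_id (max_frame_id + 1) 1
  let old_frames_list := d.keys
  let r := (PySem.List.enumerate saving_frame_ids 0).foldl
    (fun (st : PySem.Dict String (List (String × Int)) × Int × Int) (p : Int × Int) =>
      (st.1.insert (PySem.Int.toStr p.1)
          (if old_frames_list.contains p.2 then d.getD p.2 [] else []),
        (if p.2 = voting_start then p.1 else st.2.1),
        (if p.2 = voting_end then p.1 else st.2.2)))
    (PySem.Dict.empty, 0, 0)
  (r.1.items, r.2.1, r.2.2)

-- ===== PORT B =====
def replace_dict_frame_ids_alt (input_dict : List (Int × List (String × Int))) (min_frame_id : Int) (max_frame_id : Int) (voting_start : Int) (voting_end : Int) : (List (String × List (String × Int))) × Int × Int :=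
  let nf0 : PySem.Dict String (List (String × Int)) :=
    (PySem.List.pyRange 0 (max_frame_id - min_frame_id + 1) 1).foldl
      (fun d i => d.insert (PySem.Int.toStr i) []) PySem.Dict.empty
  let nf := input_dict.foldl
    (fun (nf : PySem.Dict String (List (String × Int))) p =>
      if min_frame_id ≤ p.1 ∧ p.1 ≤ max_frame_id then
        nf.insert (PySem.Int.toStr (p.1 - min_frame_id)) p.2
      else nf) nf0
  let nvs := if min_frame_id ≤ voting_start ∧ voting_start ≤ max_frame_id then voting_start - min_frame_id else 0
  let nve := if min_frame_id ≤ voting_end ∧ voting_end ≤ max_frame_id then voting_end - min_frame_id else 0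
  (nf.items, nvs, nve)

-- ===== PRECONDITION & SPEC =====
-- Pre_ excludes association lists with duplicate keys: such a list does not represent
-- a Python dict (A's argument is a dict, which cannot carry duplicate keys), so no
-- Python-reachable input is excluded.
def Pre_replace_dict_frame_ids (input_dict : List (Int × List (String × Int))) (min_frame_id : Int) (max_frame_id : Int) (voting_start : Int) (voting_end : Int) : Prop :=
  (input_dict.map Prod.fst).Nodup
instance (input_dict : List (Int × List (String × Int))) (min_frame_id : Int) (max_frame_id : Int) (voting_start : Int) (voting_end : Int) : Decidable (Pre_replace_dict_frame_ids input_dict min_frame_id max_frame_id voting_start voting_end) := by unfold Pre_replace_dict_frame_ids; infer_instance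

def pvWitness_replace_dict_frame_ids : (List (Int × List (String × Int))) × Int × Int × Int × Int :=
  ([(5, [("a", 1)]), (7, [])], 4, 7, 5, 9)

def Spec_replace_dict_frame_ids (input_dict : List (Int × List (String × Int))) (min_frame_id : Int) (max_frame_id : Int) (voting_start : Int) (voting_end : Int) (out : (List (String × List (String × Int))) × Int × Int) : Prop := out = replace_dict_frame_ids_alt input_dict min_frame_id max_frame_id voting_start voting_end
instance (input_dict : List (Int × List (String × Int))) (min_frame_id : Int) (max_frame_id : Int) (voting_start : Int) (voting_end : Int) (out : (List (String × List (String × Int))) × Int × Int) : Decidable (Spec_replace_dict_frame_ids input_dict min_frame_id max_frame_id voting_start voting_end out) := by unfold Spec_replace_dict_frame_ids; infer_instance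

-- ===== CLAIM (what is proved, stated in full; the proofs are below) =====
def Claim_equal_replace_dict_frame_ids : Prop := ∀ (input_dict : List (Int × List (String × Int))) (min_frame_id : Int) (max_frame_id : Int) (voting_start : Int) (voting_end : Int), Dom_replace_dict_frame_ids input_dict min_frame_id max_frame_id voting_start voting_end → Pre_replace_dict_frame_ids input_dict min_frame_id max_frame_id voting_start voting_end → Spec_replace_dict_frame_ids input_dict min_frame_id max_frame_id voting_start voting_end (replace_dict_frame_ids input_dict min_frame_id max_frame_id voting_start voting_end)

-- ===== LEMMAS AND PROOFS =====

-- str(n) is injective on the naturals (digit-list decomposition)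
lemma pv_digitChar_inj : ∀ a, a < 10 → ∀ b, b < 10 → Nat.digitChar a = Nat.digitChar b → a = b := by
  decide

lemma pv_toDigits_inj (a : Nat) : ∀ b : Nat, Nat.toDigits 10 a = Nat.toDigits 10 b → a = b := by
  induction a using Nat.strong_induction_on with
  | _ a ih =>
    intro b h
    by_cases ha : a < 10 <;> by_cases hb : b < 10
    · rw [Nat.toDigits_of_lt_base ha, Nat.toDigits_of_lt_base hb] at h
      exact pv_digitChar_inj a ha b hb (List.singleton_inj.mp h)
    · rw [Nat.toDigits_of_lt_base ha,
        Nat.toDigits_of_base_le (by norm_num) (by omega)] at h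
      have hlen := congrArg List.length h
      simp only [List.length_append, List.length_cons, List.length_nil] at hlen
      have := Nat.length_toDigits_pos (b := 10) (n := b / 10)
      omega
    · rw [Nat.toDigits_of_lt_base hb,
        Nat.toDigits_of_base_le (by norm_num) (by omega)] at h
      have hlen := congrArg List.length h
      simp only [List.length_append, List.length_cons, List.length_nil] at hlen
      have := Nat.length_toDigits_pos (b := 10) (n := a / 10)
      omega
    · rw [Nat.toDigits_of_base_le (by norm_num) (by omega : (10:Nat) ≤ a),
        Nat.toDigits_of_base_le (by norm_num) (by omega : (10:Nat) ≤ b)] at h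
      have h1 := List.append_inj_left' h (by simp)
      have h2 := List.append_inj_right' h (by simp)
      have hd : a / 10 = b / 10 := ih (a / 10) (by omega) (b / 10) h1
      have hm : a % 10 = b % 10 :=
        pv_digitChar_inj _ (Nat.mod_lt _ (by norm_num)) _ (Nat.mod_lt _ (by norm_num))
          (List.singleton_inj.mp h2)
      omega

lemma pv_toStr_inj {a b : Int} (ha : 0 ≤ a) (hb : 0 ≤ b)
    (h : PySem.Int.toStr a = PySem.Int.toStr b) : a = b := by
  have h' := congrArg String.toList h
  rw [PySem.Int.toList_toStr, PySem.Int.toList_toStr] at h'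
  unfold PySem.Int.toChars at h'
  rw [if_neg (by omega), if_neg (by omega)] at h'
  have := pv_toDigits_inj _ _ h'
  omega

lemma pv_keys_nodup (n : Nat) :
    ((List.range n).map (fun k : Nat => PySem.Int.toStr (k : Int))).Nodup := by
  refine List.Nodup.map (f := fun k : Nat => PySem.Int.toStr (k : Int)) ?_ List.nodup_range
  intro x y h
  have : (x : Int) = (y : Int) :=
    pv_toStr_inj (Int.natCast_nonneg x) (Int.natCast_nonneg y) h
  exact_mod_cast this

lemma pv_fold_split (l : List (Int × Int))
    (fd : PySem.Dict String (List (String × Int)) → Int × Int → PySem.Dict String (List (String × Int)))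
    (fs fe : Int → Int × Int → Int) :
    ∀ (nf : PySem.Dict String (List (String × Int))) (vs ve : Int),
    l.foldl (fun st p => (fd st.1 p, fs st.2.1 p, fe st.2.2 p)) (nf, vs, ve)
      = (l.foldl fd nf, l.foldl fs vs, l.foldl fe ve) := by
  induction l with
  | nil => intro nf vs ve; rfl
  | cons p t ih => intro nf vs ve; simp only [List.foldl_cons]; exact ih _ _ _

lemma pv_enumerate_map_range (f : Nat → Int) (n : Nat) (s : Int) :
    PySem.List.enumerate ((List.range n).map (fun k : Nat => f k)) s
      = (List.range n).map (fun k : Nat => ((s + k : Int), f k)) := by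
  induction n generalizing s with
  | zero => simp only [List.range_zero, List.map_nil]; exact PySem.List.enumerate_nil _
  | succ m ihm =>
    rw [List.range_succ]
    simp only [List.map_append, List.map_cons, List.map_nil]
    rw [PySem.List.enumerate_append, ihm]
    simp [PySem.List.enumerate_cons, PySem.List.enumerate_nil]

lemma pv_vote_fold (t : Int) : ∀ (n : Nat) (s a init : Int),
    ((List.range n).map (fun k : Nat => ((s + k : Int), (a + k : Int)))).foldl
        (fun v p => if p.2 = t then p.1 else v) init
      = if a ≤ t ∧ t < a + n then s + (t - a) else init := by
  intro n
  induction n with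
  | zero =>
    intro s a init
    simp only [List.range_zero, List.map_nil, List.foldl_nil, Nat.cast_zero]
    rw [if_neg (by omega)]
  | succ m ihm =>
    intro s a init
    rw [List.range_succ]
    simp only [List.map_append, List.map_cons, List.map_nil, List.foldl_append, List.foldl_cons,
      List.foldl_nil, ihm]
    push_cast
    split_ifs <;> omega

def pvLookup (l : List (Int × List (String × Int))) (k : Int) : Option (List (String × Int)) :=
  (PySem.Dict.mk l).get? k

def pvCanon (l : List (Int × List (String × Int))) (mn : Int) (m : Nat) :
    List (String × List (String × Int)) :=
  (List.range m).map (fun k : Nat => (PySem.Int.toStr (k : Int), (pvLookup l (mn + k)).getD []))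

lemma pv_getD_eq_lookup (l : List (Int × List (String × Int))) (k : Int) :
    (if (PySem.Dict.mk l).keys.contains k then (PySem.Dict.mk l).getD k [] else [])
      = ((pvLookup l k).getD []) := by
  by_cases h : (PySem.Dict.mk l).keys.contains k
  · rw [if_pos h]; rfl
  · rw [if_neg h]
    have : (PySem.Dict.mk l).get? k = none := by
      rw [PySem.Dict.get?_eq_none_iff_not_mem_keys]
      simpa using h
    simp [pvLookup, this]

lemma pv_A_items (l : List (Int × List (String × Int))) (mn mx vs ve : Int) :
    replace_dict_frame_ids l mn mx vs ve
      = (pvCanon l mn (mx + 1 - mn).toNat,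
         (if mn ≤ vs ∧ vs ≤ mx then vs - mn else 0),
         (if mn ≤ ve ∧ ve ≤ mx then ve - mn else 0)) := by
  unfold replace_dict_frame_ids
  simp only []
  rw [PySem.List.pyRange_one]
  rw [pv_enumerate_map_range (fun k : Nat => mn + k) _ 0]
  rw [pv_fold_split _
    (fun (nf : PySem.Dict String (List (String × Int))) (p : Int × Int) =>
      nf.insert (PySem.Int.toStr p.1)
        (if (PySem.Dict.mk l).keys.contains p.2 then (PySem.Dict.mk l).getD p.2 [] else []))
    (fun (v : Int) (p : Int × Int) => if p.2 = vs then p.1 else v)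
    (fun (v : Int) (p : Int × Int) => if p.2 = ve then p.1 else v)]
  dsimp only
  set m := (mx + 1 - mn).toNat with hm
  congr 1
  · -- dict component
    rw [PySem.Dict.items_foldl_insert_fresh _ (fun p : Int × Int => PySem.Int.toStr p.1)
      (fun p : Int × Int => if (PySem.Dict.mk l).keys.contains p.2 then (PySem.Dict.mk l).getD p.2 [] else [])
      PySem.Dict.empty (fun a _ => PySem.Dict.contains_empty _)
      (by rw [List.map_map]
          have : ((fun p : Int × Int => PySem.Int.toStr p.1) ∘ (fun k : Nat => ((0 + k : Int), mn + k)))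
              = fun k : Nat => PySem.Int.toStr (k : Int) := by
            funext k; simp
          rw [this]; exact pv_keys_nodup m)]
    simp only [PySem.Dict.empty, List.nil_append, List.map_map, pvCanon]
    apply List.map_congr_left
    intro k hk
    simp only [Function.comp]
    rw [pv_getD_eq_lookup]
    simp
  · congr 1
    · rw [pv_vote_fold vs m 0 mn 0]
      split_ifs <;> omega
    · rw [pv_vote_fold ve m 0 mn 0]
      split_ifs <;> omega

lemma pv_lookup_cons (p : Int × List (String × Int)) (rest : List (Int × List (String × Int))) (x : Int) :
    pvLookup (p :: rest) x = if p.1 = x then some p.2 else pvLookup rest x := by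
  unfold pvLookup
  rw [show (PySem.Dict.mk (p :: rest)) = PySem.Dict.mk ((p.1, p.2) :: rest) by rfl]
  rw [PySem.Dict.get?_mk_cons]
  simp

lemma pv_lookup_none (rest : List (Int × List (String × Int))) (x : Int)
    (hx : x ∉ rest.map Prod.fst) : pvLookup rest x = none := by
  unfold pvLookup
  rw [PySem.Dict.get?_eq_none_iff_not_mem_keys]
  simpa [PySem.Dict.keys_mk] using hx

lemma pv_scatter (mn mx : Int) (m : Nat) (hm : m = (mx + 1 - mn).toNat) :
    ∀ (l : List (Int × List (String × Int))), (l.map Prod.fst).Nodup →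
    ∀ (g : PySem.Dict String (List (String × Int))) (f : Nat → List (String × Int)),
    g.items = (List.range m).map (fun k : Nat => (PySem.Int.toStr (k : Int), f k)) →
    (l.foldl (fun nf p =>
        if mn ≤ p.1 ∧ p.1 ≤ mx then nf.insert (PySem.Int.toStr (p.1 - mn)) p.2 else nf) g).items
      = (List.range m).map (fun k : Nat => (PySem.Int.toStr (k : Int), (pvLookup l (mn + k)).getD (f k))) := by
  intro l
  induction l with
  | nil =>
    intro _ g f hg
    simpa [pvLookup, PySem.Dict.get?, PySem.Dict.items] using hg
  | cons p rest ih =>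
    intro hnd g f hg
    have hnd' : (p.1 :: rest.map Prod.fst).Nodup := by simpa using hnd
    have hhead : p.1 ∉ rest.map Prod.fst := (List.nodup_cons.mp hnd').1
    simp only [List.foldl_cons]
    by_cases hr : mn ≤ p.1 ∧ p.1 ≤ mx
    · rw [if_pos hr]
      have hcont : g.contains (PySem.Int.toStr (p.1 - mn)) = true := by
        unfold PySem.Dict.contains
        rw [hg, List.any_map, List.any_eq_true]
        refine ⟨(p.1 - mn).toNat, List.mem_range.mpr (by omega), ?_⟩
        simp only [Function.comp]
        have : ((p.1 - mn).toNat : Int) = p.1 - mn := by omega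
        rw [this]
        exact beq_self_eq_true _
      have hitems := PySem.Dict.items_insert_of_contains g p.2 hcont
      rw [hg] at hitems
      have hitems' : (g.insert (PySem.Int.toStr (p.1 - mn)) p.2).items
          = (List.range m).map (fun k : Nat =>
              (PySem.Int.toStr (k : Int),
                if (k : Int) = p.1 - mn then p.2 else f k)) := by
        rw [hitems, List.map_map]
        apply List.map_congr_left
        intro k hk
        simp only [Function.comp]
        by_cases hkeq : (k : Int) = p.1 - mn
        · rw [if_pos hkeq]
          have : PySem.Int.toStr (k : Int) = PySem.Int.toStr (p.1 - mn) := by rw [hkeq]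
          simp [this]
        · have : (PySem.Int.toStr (k : Int) == PySem.Int.toStr (p.1 - mn)) = false := by
            apply beq_false_of_ne
            intro hc
            exact hkeq (pv_toStr_inj (Int.natCast_nonneg k) (by omega) hc)
          simp [this, hkeq]
      rw [ih hnd'.of_cons _ _ hitems']
      apply List.map_congr_left
      intro k hk
      rw [pv_lookup_cons]
      by_cases hke : p.1 = mn + k
      · rw [if_pos hke]
        have hnone : pvLookup rest (mn + k) = none := by
          apply pv_lookup_none
          rw [← hke]
          exact hhead
        rw [hnone]
        simp only [Option.getD_some, Option.getD_none]
        rw [if_pos (by omega)]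
      · rw [if_neg hke]
        rw [if_neg (by omega)]
    · rw [if_neg hr]
      rw [ih hnd'.of_cons _ _ hg]
      apply List.map_congr_left
      intro k hk
      rw [pv_lookup_cons, if_neg (by rw [List.mem_range] at hk; omega)]

lemma pv_B_items (l : List (Int × List (String × Int))) (mn mx vs ve : Int)
    (hnd : (l.map Prod.fst).Nodup) :
    replace_dict_frame_ids_alt l mn mx vs ve
      = (pvCanon l mn (mx + 1 - mn).toNat,
         (if mn ≤ vs ∧ vs ≤ mx then vs - mn else 0),
         (if mn ≤ ve ∧ ve ≤ mx then ve - mn else 0)) := by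
  unfold replace_dict_frame_ids_alt
  dsimp only
  congr 1
  rw [PySem.List.pyRange_one]
  have hm0 : (mx - mn + 1 - 0).toNat = (mx + 1 - mn).toNat := by omega
  rw [hm0]
  set m := (mx + 1 - mn).toNat with hm
  have hfresh := PySem.Dict.items_foldl_insert_fresh
      ((List.range m).map (fun k : Nat => ((0 : Int) + k)))
      (fun i : Int => PySem.Int.toStr i) (fun _ : Int => ([] : List (String × Int)))
      PySem.Dict.empty (fun a _ => PySem.Dict.contains_empty _)
      (by rw [List.map_map]
          have : ((fun i : Int => PySem.Int.toStr i) ∘ (fun k : Nat => ((0 : Int) + k)))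
              = fun k : Nat => PySem.Int.toStr (k : Int) := by funext k; simp
          rw [this]; exact pv_keys_nodup m)
  rw [pv_scatter mn mx m hm l hnd _ (fun _ => []) (by
    rw [hfresh]
    simp only [PySem.Dict.empty, List.nil_append, List.map_map]
    apply List.map_congr_left
    intro k hk
    simp)]
  rfl

-- ===== VERDICT (by name: the statement is the Claim_ definition above) =====
theorem replace_dict_frame_ids_spec : Claim_equal_replace_dict_frame_ids := by
  intro input_dict mn mx vs ve _hdom hpre
  unfold Spec_replace_dict_frame_ids
  rw [pv_A_items, pv_B_items input_dict mn mx vs ve hpre]
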